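-- pv_equiv track=rewrite | github.com/isabelzaza/chatbot | streamlit_app.py | is_valid_evidence
-- ===== SOURCE A (Python) =====
-- def is_valid_evidence(evidence_text):
--     """Check if evidence is actually valid or just the LLM saying 'not found'"""
--     if not evidence_text:
--         return False
--
--     # Phrases that indicate the LLM couldn't find information
--     invalid_phrases = [
--         "not applicable",
--         "no mention",
--         "not found",
--         "no information",
--         "could not find",
--         "couldn't find",
--         "no evidence",
--         "not stated",
--         "not specified",
--         "does not mention",
--         "doesn't mention"
--     ]
--
--     evidence_lower = evidence_text.lower()
--     return not any(phrase in evidence_lower for phrase in invalid_phrases)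
-- ===== SOURCE B (Python) =====
-- def is_valid_evidence(evidence_text):
--     """Check if evidence is actually valid or just the LLM saying 'not found'"""
--     if not evidence_text:
--         return False
--
--     invalid_phrases = [
--         "not applicable",
--         "no mention",
--         "not found",
--         "no information",
--         "could not find",
--         "couldn't find",
--         "no evidence",
--         "not stated",
--         "not specified",
--         "does not mention",
--         "doesn't mention"
--     ]
--
--     # Single left-to-right scan over positions: at each position, try to match
--     # every phrase character by character, case-folding the text on the fly.
--     n = len(evidence_text)
--     for j in range(n):
--         for phrase in invalid_phrases:
--             if j + len(phrase) <= n and all(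
--                 evidence_text[j + k].lower() == phrase[k] for k in range(len(phrase))
--             ):
--                 return False
--     return True
-- ===== Notes on version B (the rewrite author's own statement) =====
-- stated objective: alternative
-- what changed: Replaces A's eleven independent lowered-text substring scans (one per phrase) with one left-to-right scan over text positions that tries each phrase character-by-character with on-the-fly case folding, never building a lowered copy of the text.
import Mathlib
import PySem

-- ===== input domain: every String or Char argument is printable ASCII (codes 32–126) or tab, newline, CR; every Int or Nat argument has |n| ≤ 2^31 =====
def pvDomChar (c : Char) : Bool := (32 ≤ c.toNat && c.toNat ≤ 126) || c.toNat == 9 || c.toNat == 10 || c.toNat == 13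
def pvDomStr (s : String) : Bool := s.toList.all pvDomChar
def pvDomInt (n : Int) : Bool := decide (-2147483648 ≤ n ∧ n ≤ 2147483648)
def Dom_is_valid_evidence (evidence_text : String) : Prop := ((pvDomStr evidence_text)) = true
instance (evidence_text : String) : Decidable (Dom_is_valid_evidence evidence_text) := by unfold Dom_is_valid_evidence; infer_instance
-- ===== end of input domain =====

-- B replaces A's eleven independent substring scans of the lowered text by one
-- position-by-position scan matching each phrase char-by-char with on-the-fly case folding.

-- ===== PORT A =====
def phrasesA : List String :=
  ["not applicable", "no mention", "not found", "no information", "could not find",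
   "couldn't find", "no evidence", "not stated", "not specified", "does not mention",
   "doesn't mention"]

def is_valid_evidence (evidence_text : String) : Bool :=
  if evidence_text == "" then false
  else
    !(phrasesA.any fun phrase => PySem.Str.isIn phrase (PySem.Str.lower evidence_text))

-- ===== PORT B =====
def phrasesB : List (List Char) :=
  ["not applicable".toList, "no mention".toList, "not found".toList, "no information".toList,
   "could not find".toList, "couldn't find".toList, "no evidence".toList, "not stated".toList,
   "not specified".toList, "does not mention".toList, "doesn't mention".toList]

-- 'all(text[j+k].lower() == phrase[k] for k in range(len(phrase)))' plus the length guard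
def matchAt : List Char → List Char → Bool
  | [], _ => true
  | _ :: _, [] => false
  | p :: ps, c :: cs => (PySem.Chars.lowerChar c == p) && matchAt ps cs

-- 'for j in range(n): for phrase in invalid_phrases: …' — scan over positions (suffixes)
def scanB : List Char → Bool
  | [] => false
  | c :: rest => (phrasesB.any fun p => matchAt p (c :: rest)) || scanB rest

def is_valid_evidence_alt (evidence_text : String) : Bool :=
  if evidence_text == "" then false
  else !(scanB evidence_text.toList)

-- ===== PRECONDITION & SPEC =====
def Spec_is_valid_evidence (evidence_text : String) (out : Bool) : Prop := out = is_valid_evidence_alt evidence_text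
instance (evidence_text : String) (out : Bool) : Decidable (Spec_is_valid_evidence evidence_text out) := by unfold Spec_is_valid_evidence; infer_instance

-- ===== CLAIM (what is proved, stated in full; the proofs are below) =====
def Claim_equal_is_valid_evidence : Prop := ∀ (evidence_text : String), Dom_is_valid_evidence evidence_text → Spec_is_valid_evidence evidence_text (is_valid_evidence evidence_text)

-- ===== LEMMAS AND PROOFS =====

theorem matchAt_iff (p cs : List Char) :
    matchAt p cs = true ↔ p <+: PySem.Chars.lower cs := by
  induction p generalizing cs with
  | nil => simp [matchAt]
  | cons x ps ih =>
    cases cs with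
    | nil => simp [matchAt, PySem.Chars.lower]
    | cons c cs =>
      simp only [matchAt, Bool.and_eq_true, beq_iff_eq, PySem.Chars.lower, List.map_cons,
        List.cons_prefix_cons, ih]
      constructor <;> rintro ⟨h1, h2⟩ <;> exact ⟨h1.symm, h2⟩

theorem phrasesB_ne_nil : ∀ p ∈ phrasesB, p ≠ [] := by decide

theorem scanB_iff (cs : List Char) :
    scanB cs = true ↔ ∃ p ∈ phrasesB, ∃ j, p <+: (PySem.Chars.lower cs).drop j := by
  induction cs with
  | nil =>
    simp only [scanB, PySem.Chars.lower, List.map_nil, List.drop_nil]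
    constructor
    · intro h; cases h
    · rintro ⟨p, hp, j, hpre⟩
      exact absurd (List.prefix_nil.mp hpre) (phrasesB_ne_nil p hp)
  | cons c cs ih =>
    simp only [scanB, Bool.or_eq_true, List.any_eq_true, ih]
    constructor
    · rintro (⟨p, hp, hm⟩ | ⟨p, hp, j, hpre⟩)
      · exact ⟨p, hp, 0, by simpa using (matchAt_iff p (c :: cs)).mp hm⟩
      · refine ⟨p, hp, j + 1, ?_⟩
        simpa [PySem.Chars.lower] using hpre
    · rintro ⟨p, hp, j, hpre⟩
      cases j with
      | zero =>
        exact Or.inl ⟨p, hp, (matchAt_iff p (c :: cs)).mpr (by simpa using hpre)⟩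
      | succ j =>
        exact Or.inr ⟨p, hp, j, by simpa [PySem.Chars.lower] using hpre⟩

theorem phrasesB_eq : phrasesB = phrasesA.map String.toList := by decide

theorem scan_eq_any (s : String) :
    (phrasesA.any fun phrase => PySem.Str.isIn phrase (PySem.Str.lower s)) = scanB s.toList := by
  rw [Bool.eq_iff_iff]
  rw [scanB_iff, phrasesB_eq]
  simp only [List.any_eq_true, List.mem_map]
  constructor
  · rintro ⟨q, hq, hin⟩
    refine ⟨q.toList, ⟨q, hq, rfl⟩, ?_⟩
    have : PySem.Chars.isIn q.toList (PySem.Chars.lower s.toList) = true := by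
      simpa [PySem.Str.toList_lower] using hin
    exact (PySem.Chars.exists_prefix_drop_iff_isIn _ _).mpr this
  · rintro ⟨p, ⟨q, hq, rfl⟩, j, hpre⟩
    refine ⟨q, hq, ?_⟩
    have : PySem.Chars.isIn q.toList (PySem.Chars.lower s.toList) = true :=
      (PySem.Chars.exists_prefix_drop_iff_isIn _ _).mp ⟨j, hpre⟩
    simpa [PySem.Str.toList_lower] using this

-- ===== VERDICT (by name: the statement is the Claim_ definition above) =====
theorem is_valid_evidence_spec : Claim_equal_is_valid_evidence := by
  intro s _
  unfold Spec_is_valid_evidence is_valid_evidence is_valid_evidence_alt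
  by_cases h : s == ""
  · simp [h]
  · rw [if_neg h, if_neg h, scan_eq_any s]
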